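-- pv_equiv track=rewrite | github.com/srodriguez/InfiniteMarioPython | src/python/competition/agents/binaryWorld.py | binaryWorldMaker
-- ===== SOURCE A (Python) =====
-- def binaryWorldMaker(state, dictionary):
--     ## Get the world representation
--     state[4] = state
--
--     # Enemies
--     enemyList = []
--     for i in range(0, 21):
--         enemyList.append([0] * 22)
--
--     counter = 0
--     for i in state:
--         for e in dictionary.get('enemies'):
--             idList = [v for v, val in enumerate(i) if val == e]
--             for location in idList:
--                 enemyList[counter][location] = 1
--         counter += 1
--
--     # Obstacles
--     obstaclesList = []
--     for i in range(0, 21):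
--         obstaclesList.append([0] * 22)
--
--     counter = 0
--     for i in state:
--         for e in dictionary.get('obstacles'):
--             idList = [v for v, val in enumerate(i) if val == e]
--             for location in idList:
--                 obstaclesList[counter][location] = 1
--         counter += 1
--
--     # Powerups
--     powerupsList = []
--     for i in range(0, 21):
--         powerupsList.append([0] * 22)
--
--     counter = 0
--     for i in state:
--         for e in dictionary.get('powerups'):
--             idList = [v for v, val in enumerate(i) if val == e]
--             for location in idList:
--                 powerupsList[counter][location] = 1
--         counter += 1
--
--     return enemyList, obstaclesList, powerupsList
-- ===== SOURCE B (Python) =====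
-- def binaryWorldMaker(state, dictionary):
--     ## Get the world representation (same in-place mutation as the original)
--     state[4] = state
--
--     enemies = dictionary.get('enemies')
--     obstacles = dictionary.get('obstacles')
--     powerups = dictionary.get('powerups')
--
--     enemyList = [[0] * 22 for _ in range(21)]
--     obstaclesList = [[0] * 22 for _ in range(21)]
--     powerupsList = [[0] * 22 for _ in range(21)]
--
--     # One fused pass over the cells instead of three whole-state scans.
--     counter = 0
--     for row in state:
--         for v, val in enumerate(row):
--             for e in enemies:
--                 if val == e:
--                     enemyList[counter][v] = 1
--             for e in obstacles:
--                 if val == e: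
--                     obstaclesList[counter][v] = 1
--             for e in powerups:
--                 if val == e:
--                     powerupsList[counter][v] = 1
--         counter += 1
--
--     return enemyList, obstaclesList, powerupsList
-- ===== Notes on version B (the rewrite author's own statement) =====
-- stated objective: alternative
-- what changed: The three separate whole-state scans (one per category, each building a per-symbol index list and then writing it) are fused into a single pass over the cells that checks each cell value directly against the three symbol lists.
import Mathlib
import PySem

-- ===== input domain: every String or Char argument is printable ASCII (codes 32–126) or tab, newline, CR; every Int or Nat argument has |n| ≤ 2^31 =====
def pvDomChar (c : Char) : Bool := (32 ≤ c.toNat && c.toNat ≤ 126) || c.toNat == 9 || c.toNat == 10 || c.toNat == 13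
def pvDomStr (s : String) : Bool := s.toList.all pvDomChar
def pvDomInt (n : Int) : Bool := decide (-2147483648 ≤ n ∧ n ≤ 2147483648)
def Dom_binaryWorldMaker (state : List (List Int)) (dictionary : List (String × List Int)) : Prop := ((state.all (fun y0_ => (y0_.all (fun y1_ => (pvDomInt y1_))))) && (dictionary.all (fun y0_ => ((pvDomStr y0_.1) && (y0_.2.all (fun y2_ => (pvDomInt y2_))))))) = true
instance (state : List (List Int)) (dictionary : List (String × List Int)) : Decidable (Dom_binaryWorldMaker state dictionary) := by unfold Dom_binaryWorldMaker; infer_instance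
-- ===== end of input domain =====

-- B fuses the original's three separate whole-state scans into one pass over the cells
-- (objective: alternative decomposition, same cost). A mutates its argument (state[4] = state);
-- the equivalence proved here is about the RETURN value only (B performs the same mutation in Python).


-- ===== PORT A =====
-- dictionary.get(k) (None when the key is missing; used by both ports and, or-defaulted, nowhere else)
def pvGet (dictionary : List (String × List Int)) (k : String) : Option (List Int) :=
  (PySem.Dict.mk dictionary).get? k

-- 'enemyList[counter][location] = 1' : read the row, set the cell, put the row back.
-- 'location' comes from enumerate, hence is ≥ 0, so .toNat is exact.
def pvAssign (g : List (List Int)) (c : Nat) (v : Int) : List (List Int) :=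
  g.set c ((g.getD c []).set v.toNat 1)

-- '[v for v, val in enumerate(i) if val == e]'
def pvIdList (row : List Int) (e : Int) : List Int :=
  (PySem.List.enumerate row).filterMap (fun p => if p.2 == e then some p.1 else none)

-- One scan 'counter = 0; for i in state: for e in syms: ...; counter += 1' over the MUTATED state.
-- After 'state[4] = state' row 4 is the self-referencing list of lists; in Python every comparison
-- 'val == e' of a list with an int is False, so row 4 yields an empty idList — modelled by the
-- 'if c = 4 then []' (exact; state[4] = state itself raises IndexError when len(state) < 5: Pre_).
def pvRowA (syms : List Int) (g : List (List Int)) (row : List Int) (c : Nat) : List (List Int) :=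
  syms.foldl (fun g e => (if c = 4 then [] else pvIdList row e).foldl (fun g loc => pvAssign g c loc) g) g

def pvScanA (state : List (List Int)) (syms : List Int) (grid : List (List Int)) : List (List Int) :=
  (state.foldl (fun acc row => (pvRowA syms acc.1 row acc.2, acc.2 + 1)) (grid, 0)).1

-- 'for i in range(0, 21): list.append([0] * 22)'
def pvGridA : List (List Int) :=
  (PySem.List.pyRange 0 21 1).foldl (fun acc _ => acc ++ [List.replicate 22 (0 : Int)]) []

-- dictionary.get('enemies') is the same value at every iteration, so it is fetched once here;
-- .getD [] : a missing key makes Python raise TypeError ('for e in None'), excluded by Pre_.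
def binaryWorldMaker (state : List (List Int)) (dictionary : List (String × List Int)) : List (List Int) × List (List Int) × List (List Int) :=
  (pvScanA state ((pvGet dictionary "enemies").getD []) pvGridA,
   pvScanA state ((pvGet dictionary "obstacles").getD []) pvGridA,
   pvScanA state ((pvGet dictionary "powerups").getD []) pvGridA)

-- ===== PORT B =====
-- 'for e in syms: if val == e: grid[counter][v] = 1' for one cell and one grid
def pvCell (c : Nat) (v : Int) (val : Int) (syms : List Int) (g : List (List Int)) : List (List Int) :=
  syms.foldl (fun g e => if val == e then pvAssign g c v else g) g

-- one row of B's fused pass: 'for v, val in enumerate(row):' updating the three grids;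
-- row 4 is the self-referencing list (see the comment on pvRowA), its cells match nothing: 'if c = 4 then []'.
def pvRowB (en ob pw : List Int) (t : List (List Int) × List (List Int) × List (List Int))
    (row : List Int) (c : Nat) : List (List Int) × List (List Int) × List (List Int) :=
  (if c = 4 then [] else PySem.List.enumerate row).foldl
    (fun t q => (pvCell c q.1 q.2 en t.1, pvCell c q.1 q.2 ob t.2.1, pvCell c q.1 q.2 pw t.2.2)) t

-- '[[0] * 22 for _ in range(21)]'
def pvGridB : List (List Int) := (List.range 21).map (fun _ => List.replicate 22 (0 : Int))

def binaryWorldMaker_alt (state : List (List Int)) (dictionary : List (String × List Int)) : List (List Int) × List (List Int) × List (List Int) :=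
  (state.foldl (fun acc row =>
      (pvRowB ((pvGet dictionary "enemies").getD []) ((pvGet dictionary "obstacles").getD [])
              ((pvGet dictionary "powerups").getD []) acc.1 row acc.2, acc.2 + 1))
    ((pvGridB, pvGridB, pvGridB), 0)).1

-- ===== PRECONDITION & SPEC =====
-- Pre_ is exactly where the Python A returns normally: len(state) ≥ 5 (else 'state[4] = state' raises
-- IndexError), all three keys present (else 'for e in None' raises TypeError), and no symbol of any of
-- the three lists occurs in a row with index ≥ 21 or at a column ≥ 22 of a row other than the mutated
-- row 4 (such an occurrence makes the write 'grid[counter][location] = 1' raise IndexError).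
def Pre_binaryWorldMaker (state : List (List Int)) (dictionary : List (String × List Int)) : Prop :=
  5 ≤ state.length ∧
  ((PySem.Dict.mk dictionary).get? "enemies").isSome = true ∧
  ((PySem.Dict.mk dictionary).get? "obstacles").isSome = true ∧
  ((PySem.Dict.mk dictionary).get? "powerups").isSome = true ∧
  ∀ c ∈ List.range state.length, c ≠ 4 →
    ∀ v ∈ List.range (state.getD c []).length, (21 ≤ c ∨ 22 ≤ v) →
      (state.getD c []).getD v 0 ∉
        (((PySem.Dict.mk dictionary).get? "enemies").getD [] ++
         ((PySem.Dict.mk dictionary).get? "obstacles").getD [] ++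
         ((PySem.Dict.mk dictionary).get? "powerups").getD [])

instance (state : List (List Int)) (dictionary : List (String × List Int)) : Decidable (Pre_binaryWorldMaker state dictionary) := by
  unfold Pre_binaryWorldMaker; infer_instance

def pvWitness_binaryWorldMaker : List (List Int) × (List (String × List Int)) :=
  ([[2], [0], [3], [0], [0]], [("enemies", [2]), ("obstacles", [3]), ("powerups", [5])])

def Spec_binaryWorldMaker (state : List (List Int)) (dictionary : List (String × List Int)) (out : List (List Int) × List (List Int) × List (List Int)) : Prop := out = binaryWorldMaker_alt state dictionary
instance (state : List (List Int)) (dictionary : List (String × List Int)) (out : List (List Int) × List (List Int) × List (List Int)) : Decidable (Spec_binaryWorldMaker state dictionary out) := by unfold Spec_binaryWorldMaker; infer_instance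

-- ===== CLAIM (what is proved, stated in full; the proofs are below) =====
def Claim_equal_binaryWorldMaker : Prop := ∀ (state : List (List Int)) (dictionary : List (String × List Int)), Dom_binaryWorldMaker state dictionary → Pre_binaryWorldMaker state dictionary → Spec_binaryWorldMaker state dictionary (binaryWorldMaker state dictionary)

-- ===== LEMMAS AND PROOFS =====

-- the two initial grids are the same 21 × 22 zero grid
theorem pvGrid_eq : pvGridA = pvGridB := by decide

-- writes of 1 into a fixed row commute (same cell: idempotent; different cells: List.set_comm)
theorem pvAssign_comm (c : Nat) (g : List (List Int)) (v w : Int) :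
    pvAssign (pvAssign g c v) c w = pvAssign (pvAssign g c w) c v := by
  by_cases hc : c < g.length
  · have hrow : ∀ a b : Nat, ∀ r : List Int, (r.set a 1).set b 1 = (r.set b 1).set a 1 := by
      intro a b r
      by_cases hab : a = b
      · subst hab; simp
      · exact List.set_comm 1 1 hab
    simp only [pvAssign, List.getD, List.getElem?_set_self hc, Option.getD_some, List.set_set]
    rw [hrow]
  · have h1 : g.set c ((g.getD c []).set v.toNat 1) = g := List.set_eq_of_length_le (by omega)
    have h2 : g.set c ((g.getD c []).set w.toNat 1) = g := List.set_eq_of_length_le (by omega)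
    simp only [pvAssign, h1, h2]

-- 'counter = 0; for row in state: acc = f acc row counter; counter += 1' is a fold over zipIdx
theorem pv_counterFold {β : Type} (f : β → List Int → Nat → β) (state : List (List Int)) (g : β) (n : Nat) :
    (state.foldl (fun acc row => (f acc.1 row acc.2, acc.2 + 1)) (g, n)).1
      = (state.zipIdx n).foldl (fun b q => f b q.1 q.2) g := by
  induction state generalizing g n with
  | nil => rfl
  | cons r rs ih => simpa [List.zipIdx] using ih (f g r n) (n + 1)

-- the comprehension as a flatMap
theorem pvIdList_eq (row : List Int) (e : Int) :
    pvIdList row e = (PySem.List.enumerate row).flatMap (fun q => if q.2 == e then [q.1] else []) := by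
  unfold pvIdList
  induction PySem.List.enumerate row with
  | nil => rfl
  | cons p ps ih =>
    simp only [beq_iff_eq] at ih
    by_cases h : p.2 = e <;> simp [List.flatMap_cons, h, ih]

-- B's per-cell inner loop as a fold over a flatMap
theorem pvCell_eq (c : Nat) (v val : Int) (syms : List Int) (g : List (List Int)) :
    pvCell c v val syms g
      = ((syms.flatMap (fun e => if val == e then [v] else [])).foldl (fun g loc => pvAssign g c loc) g) := by
  unfold pvCell
  induction syms generalizing g with
  | nil => rfl
  | cons e es ih =>
    simp only [beq_iff_eq] at ih
    by_cases h : val = e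
    · subst h; simp [List.flatMap_cons, ih]
    · simp [List.flatMap_cons, h, ih]

-- swapping the two flatMaps is a permutation (Multiset.bind_bind)
theorem pv_flatMap_comm {α β γ : Type} (l1 : List α) (l2 : List β) (f : α → β → List γ) :
    List.Perm (l1.flatMap fun a => l2.flatMap fun b => f a b)
              (l2.flatMap fun b => l1.flatMap fun a => f a b) := by
  rw [← Multiset.coe_eq_coe, ← Multiset.coe_bind, ← Multiset.coe_bind]
  simp only [← Multiset.coe_bind]
  exact Multiset.bind_bind _ _

-- B's per-row step on ONE grid
def pvRowB1 (syms : List Int) (g : List (List Int)) (row : List Int) (c : Nat) : List (List Int) :=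
  (if c = 4 then [] else PySem.List.enumerate row).foldl (fun g q => pvCell c q.1 q.2 syms g) g

theorem pvRowB_split (en ob pw : List Int) (t : List (List Int) × List (List Int) × List (List Int))
    (row : List Int) (c : Nat) :
    pvRowB en ob pw t row c
      = (pvRowB1 en t.1 row c, pvRowB1 ob t.2.1 row c, pvRowB1 pw t.2.2 row c) := by
  obtain ⟨a, b, d⟩ := t
  unfold pvRowB pvRowB1
  induction (if c = 4 then [] else PySem.List.enumerate row) generalizing a b d with
  | nil => rfl
  | cons q qs ih => simpa using ih (pvCell c q.1 q.2 en a) (pvCell c q.1 q.2 ob b) (pvCell c q.1 q.2 pw d)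

-- the whole fused fold splits into the three per-category folds
theorem pv_scanB_split (en ob pw : List Int) (l : List (List Int × Nat))
    (t : List (List Int) × List (List Int) × List (List Int)) :
    l.foldl (fun b q => pvRowB en ob pw b q.1 q.2) t
      = (l.foldl (fun b q => pvRowB1 en b q.1 q.2) t.1,
         l.foldl (fun b q => pvRowB1 ob b q.1 q.2) t.2.1,
         l.foldl (fun b q => pvRowB1 pw b q.1 q.2) t.2.2) := by
  induction l generalizing t with
  | nil => rfl
  | cons x xs ih => rw [List.foldl_cons, pvRowB_split, ih]; rfl

-- the per-row steps of A and B agree on one grid: both perform the same multiset of writes of 1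
theorem pvRow_eq (syms : List Int) (g : List (List Int)) (row : List Int) (c : Nat) :
    pvRowA syms g row c = pvRowB1 syms g row c := by
  unfold pvRowA pvRowB1
  by_cases hc : c = 4
  · simp [hc]
  · simp only [hc, if_false]
    have hcell : (fun (g : List (List Int)) (q : Int × Int) =>
        ((syms.flatMap (fun e => if q.2 == e then [q.1] else [])).foldl
          (fun g loc => pvAssign g c loc) g))
        = fun g q => pvCell c q.1 q.2 syms g :=
      funext fun g => funext fun q => (pvCell_eq c q.1 q.2 syms g).symm
    have hperm : List.Perm (syms.flatMap (fun e => pvIdList row e))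
        ((PySem.List.enumerate row).flatMap
          (fun q => syms.flatMap (fun e => if q.2 == e then [q.1] else []))) := by
      have := pv_flatMap_comm syms (PySem.List.enumerate row)
        (fun (e : Int) (q : Int × Int) => if q.2 == e then [q.1] else [])
      simpa [pvIdList_eq] using this
    calc syms.foldl (fun g e => (pvIdList row e).foldl (fun g loc => pvAssign g c loc) g) g
        = (syms.flatMap (fun e => pvIdList row e)).foldl (fun g loc => pvAssign g c loc) g :=
          (List.foldl_flatMap).symm
      _ = ((PySem.List.enumerate row).flatMap
            (fun q => syms.flatMap (fun e => if q.2 == e then [q.1] else []))).foldl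
            (fun g loc => pvAssign g c loc) g :=
          @List.Perm.foldl_eq _ _ (fun g loc => pvAssign g c loc) _ _
            ⟨fun b a₁ a₂ => pvAssign_comm c b a₁ a₂⟩ hperm g
      _ = (PySem.List.enumerate row).foldl
            (fun acc q => ((syms.flatMap (fun e => if q.2 == e then [q.1] else [])).foldl
              (fun g loc => pvAssign g c loc) acc)) g := List.foldl_flatMap
      _ = (PySem.List.enumerate row).foldl (fun g q => pvCell c q.1 q.2 syms g) g := by
          rw [hcell]

-- one category: A's separate scan equals B's single-grid column of the fused pass
theorem pvScan_eq (state : List (List Int)) (syms : List Int) :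
    pvScanA state syms pvGridA
      = (state.zipIdx 0).foldl (fun b q => pvRowB1 syms b q.1 q.2) pvGridB := by
  unfold pvScanA
  rw [pv_counterFold (f := fun g row c => pvRowA syms g row c), pvGrid_eq]
  rw [show (fun (b : List (List Int)) (q : List Int × Nat) => pvRowA syms b q.1 q.2)
        = fun b q => pvRowB1 syms b q.1 q.2 from
      funext fun b => funext fun q => pvRow_eq syms b q.1 q.2]

-- ===== VERDICT (by name: the statement is the Claim_ definition above) =====
theorem binaryWorldMaker_spec : Claim_equal_binaryWorldMaker := by
  intro state dictionary _ _
  show binaryWorldMaker state dictionary = binaryWorldMaker_alt state dictionary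
  unfold binaryWorldMaker binaryWorldMaker_alt
  rw [pv_counterFold (f := fun t row c =>
        pvRowB ((pvGet dictionary "enemies").getD []) ((pvGet dictionary "obstacles").getD [])
               ((pvGet dictionary "powerups").getD []) t row c)]
  rw [pv_scanB_split]
  exact Prod.ext (pvScan_eq state _) (Prod.ext (pvScan_eq state _) (pvScan_eq state _))
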